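-- pv_equiv track=rewrite | github.com/darkacer/adventOfCode | leetcode/smallestNumber/solver2.py | removeLeadingZerosConvertToString
-- ===== SOURCE A (Python) =====
-- def removeLeadingZerosConvertToString(array):
--
--     sumSoFar = 0
--     string = ''
--     for i in array:
--         sumSoFar += int(i)
--         if sumSoFar > 0:
--             string += i
--     if sumSoFar == 0:
--         return '0'
--     return string
-- ===== SOURCE B (Python) =====
-- def removeLeadingZerosConvertToString(array):
--     # Right-to-left algorithm: compute the grand total once, then walk the list
--     # backwards maintaining the suffix sum; element i is kept iff its prefix sum
--     # total - suffix_after(i) is positive. The pieces are collected in reverse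
--     # and flipped once at the end.
--     vals = [int(x) for x in array]
--     total = sum(vals)
--     if total == 0:
--         return '0'
--     parts = []
--     suffix = 0  # sum of the values strictly after the current element
--     for x, v in zip(reversed(array), reversed(vals)):
--         if total - suffix > 0:
--             parts.append(x)
--         suffix += v
--     return ''.join(reversed(parts))
-- ===== Notes on version B (the rewrite author's own statement) =====
-- stated objective: alternative
-- what changed: B replaces A's forward stateful loop (running prefix sum, conditional string concatenation) with a right-to-left algorithm: it computes the grand total once, then traverses the list backwards maintaining the suffix sum, keeping element i iff total - suffix_after(i) > 0 (which equals its prefix sum), collecting pieces in reverse and flipping once at the end.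
import Mathlib
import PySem

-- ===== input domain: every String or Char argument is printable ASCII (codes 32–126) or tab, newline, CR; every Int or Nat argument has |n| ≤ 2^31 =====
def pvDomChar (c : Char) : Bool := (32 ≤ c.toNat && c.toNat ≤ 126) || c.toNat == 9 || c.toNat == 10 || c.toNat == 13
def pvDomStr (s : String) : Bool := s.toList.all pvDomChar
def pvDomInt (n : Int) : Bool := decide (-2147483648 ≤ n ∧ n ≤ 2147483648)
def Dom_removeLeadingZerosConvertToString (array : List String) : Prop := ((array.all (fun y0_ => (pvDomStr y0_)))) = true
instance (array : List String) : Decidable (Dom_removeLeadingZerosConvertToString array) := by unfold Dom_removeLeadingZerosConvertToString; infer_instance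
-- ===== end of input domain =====

-- B recomputes the same result right-to-left: grand total once, then a backward
-- suffix-sum walk keeping element i iff total - suffix_after(i) > 0; objective: alternative.


-- ===== PORT A =====
-- int(i) is ported by PySem.Int.ofStr?; Pre_ excludes the inputs where it is none (Python ValueError).
def removeLeadingZerosConvertToString (array : List String) : String :=
  let st := array.foldl
    (fun (st : Int × String) i =>
      let s := st.1 + (PySem.Int.ofStr? i).getD 0
      (s, if 0 < s then st.2 ++ i else st.2))
    (0, "")
  if st.1 = 0 then "0" else st.2

-- ===== PORT B =====
-- Source B: vals = [int(x) for x in array]; total = sum(vals); if total == 0: '0';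
-- else walk zip(reversed(array), reversed(vals)) keeping x when total - suffix > 0,
-- then join the reversed parts.
def removeLeadingZerosConvertToString_alt (array : List String) : String :=
  let vals := array.map (fun x => (PySem.Int.ofStr? x).getD 0)
  let total := vals.sum
  if total = 0 then "0"
  else
    let st := (array.reverse.zip vals.reverse).foldl
      (fun (st : Int × List String) xv =>
        (st.1 + xv.2, if 0 < total - st.1 then st.2 ++ [xv.1] else st.2))
      (0, ([] : List String))
    String.join st.2.reverse

-- ===== PRECONDITION & SPEC =====
-- Pre_: every element parses as a Python int; elsewhere A (and B) raise ValueError.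
def Pre_removeLeadingZerosConvertToString (array : List String) : Prop :=
  (array.all (fun s => (PySem.Int.ofStr? s).isSome)) = true
instance (array : List String) : Decidable (Pre_removeLeadingZerosConvertToString array) := by
  unfold Pre_removeLeadingZerosConvertToString; infer_instance
def pvWitness_removeLeadingZerosConvertToString : List String := ["0", "2", "-1"]

def Spec_removeLeadingZerosConvertToString (array : List String) (out : String) : Prop := out = removeLeadingZerosConvertToString_alt array
instance (array : List String) (out : String) : Decidable (Spec_removeLeadingZerosConvertToString array out) := by unfold Spec_removeLeadingZerosConvertToString; infer_instance

-- ===== CLAIM (what is proved, stated in full; the proofs are below) =====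
def Claim_equal_removeLeadingZerosConvertToString : Prop := ∀ (array : List String), Dom_removeLeadingZerosConvertToString array → Pre_removeLeadingZerosConvertToString array → Spec_removeLeadingZerosConvertToString array (removeLeadingZerosConvertToString array)

-- ===== LEMMAS AND PROOFS =====

-- the parsed value of one element
def pvVal (x : String) : Int := (PySem.Int.ofStr? x).getD 0

-- running prefix sums starting from s
def pvPrefixSums : Int → List String → List Int
  | _, [] => []
  | t, x :: xs =>
    let t' := t + pvVal x
    t' :: pvPrefixSums t' xs

-- the kept elements, in forward order, when the prefix before l sums to b
def pvKept : Int → List (String × Int) → List String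
  | _, [] => []
  | b, (x, v) :: r => (if 0 < b + v then [x] else []) ++ pvKept (b + v) r

theorem pv_foldl_append_str (l : List String) : ∀ (a : String),
    List.foldl (fun r s => r ++ s) a l = a ++ String.join l := by
  induction l with
  | nil => intro a; simp [String.join]
  | cons b l ih =>
    intro a
    have hj : String.join (b :: l) = b ++ String.join l := by
      show List.foldl (fun r s => r ++ s) "" (b :: l) = _
      rw [List.foldl_cons, ih]
      simp
    rw [List.foldl_cons, ih, hj, String.append_assoc]

theorem pv_join_cons (x : String) (l : List String) :
    String.join (x :: l) = x ++ String.join l := by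
  show List.foldl (fun r s => r ++ s) "" (x :: l) = _
  rw [List.foldl_cons, pv_foldl_append_str]
  simp

-- A's loop, started from running sum s and accumulated string acc
theorem pv_loop_char (xs : List String) : ∀ (s : Int) (acc : String),
    xs.foldl
      (fun (st : Int × String) i =>
        let t := st.1 + (PySem.Int.ofStr? i).getD 0
        (t, if 0 < t then st.2 ++ i else st.2))
      (s, acc)
    = ((pvPrefixSums s xs).getLastD s,
       acc ++ String.join (pvKept s (xs.zip (xs.map pvVal)))) := by
  induction xs with
  | nil => intro s acc; simp [pvPrefixSums, pvKept, String.join]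
  | cons x xs ih =>
    intro s acc
    simp only [List.foldl_cons, pvPrefixSums, pvKept, List.map_cons, List.zip_cons_cons,
      List.getLastD_cons]
    rw [ih]
    by_cases h : 0 < s + (PySem.Int.ofStr? x).getD 0 <;>
      simp [h, pvVal, pv_join_cons, String.append_assoc]

-- the last prefix sum is the start plus the total
theorem pv_last_prefix (xs : List String) : ∀ (s : Int),
    (pvPrefixSums s xs).getLastD s = s + (xs.map pvVal).sum := by
  induction xs with
  | nil => intro s; simp [pvPrefixSums]
  | cons x xs ih =>
    intro s
    simp only [pvPrefixSums, List.getLastD_cons, List.map_cons, List.sum_cons]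
    rw [ih]
    ring

-- zipping the reverses is the reverse of the zip (equal lengths)
theorem pv_zip_reverse (l1 : List String) : ∀ (l2 : List Int), l1.length = l2.length →
    l1.reverse.zip l2.reverse = (l1.zip l2).reverse := by
  induction l1 with
  | nil => intro l2 h; simp [(List.length_eq_zero_iff).mp h.symm]
  | cons x xs ih =>
    intro l2 h
    cases l2 with
    | nil => simp at h
    | cons y ys =>
      have h' : xs.length = ys.length := by simpa using h
      simp only [List.reverse_cons]
      rw [List.zip_append (by simp [h']), ih ys h']
      simp

-- B's backward fold, expressed as a foldr over the forward zip list: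
-- it returns (sum of the values, kept elements in reverse order)
theorem pv_backfold (T : Int) (l : List (String × Int)) :
    l.foldr
      (fun xv (st : Int × List String) =>
        (st.1 + xv.2, if 0 < T - st.1 then st.2 ++ [xv.1] else st.2))
      (0, ([] : List String))
    = ((l.map Prod.snd).sum, (pvKept (T - (l.map Prod.snd).sum) l).reverse) := by
  induction l with
  | nil => simp [pvKept]
  | cons p r ih =>
    obtain ⟨x, v⟩ := p
    simp only [List.foldr_cons, ih, pvKept, List.map_cons, List.sum_cons]
    have hb : T - (v + (r.map Prod.snd).sum) + v = T - (r.map Prod.snd).sum := by ring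
    simp only [hb]
    by_cases h : (r.map Prod.snd).sum < T <;>
      simp [h, add_comm]

theorem removeLeadingZerosConvertToString_eq (array : List String) :
    removeLeadingZerosConvertToString array = removeLeadingZerosConvertToString_alt array := by
  have hv : array.map (fun x => (PySem.Int.ofStr? x).getD 0) = array.map pvVal := rfl
  have hlen : array.length = (array.map pvVal).length := by simp
  unfold removeLeadingZerosConvertToString removeLeadingZerosConvertToString_alt
  simp only [hv, pv_loop_char, pv_last_prefix, zero_add,
    pv_zip_reverse array (array.map pvVal) hlen, List.foldl_reverse, pv_backfold,
    List.map_snd_zip (le_of_eq hlen.symm), sub_self, List.reverse_reverse]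
  by_cases h : (array.map pvVal).sum = 0 <;> simp [h]

-- ===== VERDICT (by name: the statement is the Claim_ definition above) =====
theorem removeLeadingZerosConvertToString_spec : Claim_equal_removeLeadingZerosConvertToString := by
  intro array _ _
  exact removeLeadingZerosConvertToString_eq array
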